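-- pv_equiv track=rewrite | github.com/cmbenello/141-discussion | solutions/conditional_loops_sols.py | cl_09_is_alternating_parity
-- ===== SOURCE A (Python) =====
-- from typing import List, Tuple, Optional
--
-- def cl_09_is_alternating_parity(nums: List[int]) -> bool:
--     """Return True if parity alternates for adjacent elements. Vacuously True for len<=1."""
--     if len(nums) <= 1:
--         return True
--     prev_par = nums[0] & 1
--     for i in range(1, len(nums)):
--         if (nums[i] & 1) == prev_par:
--             return False
--         prev_par = nums[i] & 1
--     return True
-- ===== SOURCE B (Python) =====
-- from typing import List
--
-- def cl_09_is_alternating_parity(nums: List[int]) -> bool: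
--     """Return True if parity alternates for adjacent elements. Vacuously True for len<=1."""
--     if len(nums) <= 1:
--         return True
--     start = nums[0] & 1
--     return all((x & 1) == (start + i) % 2 for i, x in enumerate(nums))
-- ===== Notes on version B (the rewrite author's own statement) =====
-- stated objective: alternative
-- what changed: B keeps no previous-element state: each element's parity is compared against the positional expectation (start + index) % 2 derived from the first element, instead of against its neighbour.
import Mathlib
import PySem

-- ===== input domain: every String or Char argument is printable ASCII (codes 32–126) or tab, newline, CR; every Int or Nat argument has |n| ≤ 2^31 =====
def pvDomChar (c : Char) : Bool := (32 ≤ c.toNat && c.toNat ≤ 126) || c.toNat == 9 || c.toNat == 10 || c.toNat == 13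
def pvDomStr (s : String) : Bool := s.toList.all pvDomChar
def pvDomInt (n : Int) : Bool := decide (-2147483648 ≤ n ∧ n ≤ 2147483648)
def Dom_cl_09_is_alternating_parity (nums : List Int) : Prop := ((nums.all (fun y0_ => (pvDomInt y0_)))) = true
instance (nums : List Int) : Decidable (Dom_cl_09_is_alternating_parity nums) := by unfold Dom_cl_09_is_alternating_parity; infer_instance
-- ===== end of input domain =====

-- B compares each element's parity with the positional expectation (start + index) % 2 instead of the neighbour's parity; alternative decomposition, same cost.
-- ===== PORT A =====
-- A's for-loop over i in range(1, len), carrying prev_par, as structural recursion over the tail.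
def pvLoopA (prev : Int) : List Int → Bool
  | [] => true
  | y :: ys => if (y % 2) == prev then false else pvLoopA (y % 2) ys

def cl_09_is_alternating_parity (nums : List Int) : Bool :=
  if nums.length ≤ 1 then true
  else
    match nums with
    | [] => true
    | x :: xs => pvLoopA (x % 2) xs

-- ===== PORT B =====
-- the all(...) generator over enumerate(nums), with the index carried explicitly
def pvCheckFrom (start : Int) (i : Nat) : List Int → Bool
  | [] => true
  | x :: xs => ((x % 2) == ((start + (i : Int)) % 2)) && pvCheckFrom start (i + 1) xs

def cl_09_is_alternating_parity_alt (nums : List Int) : Bool :=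
  if nums.length ≤ 1 then true
  else
    let start := nums.headI % 2
    pvCheckFrom start 0 nums

-- ===== PRECONDITION & SPEC =====
def Spec_cl_09_is_alternating_parity (nums : List Int) (out : Bool) : Prop := out = cl_09_is_alternating_parity_alt nums
instance (nums : List Int) (out : Bool) : Decidable (Spec_cl_09_is_alternating_parity nums out) := by unfold Spec_cl_09_is_alternating_parity; infer_instance

-- ===== CLAIM (what is proved, stated in full; the proofs are below) =====
def Claim_equal_cl_09_is_alternating_parity : Prop := ∀ (nums : List Int), Dom_cl_09_is_alternating_parity nums → Spec_cl_09_is_alternating_parity nums (cl_09_is_alternating_parity nums)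

-- ===== LEMMAS AND PROOFS =====
lemma pvLoop_check (ys : List Int) : ∀ (s : Int) (i : Nat),
    pvLoopA ((s + (i : Int)) % 2) ys = pvCheckFrom s (i + 1) ys := by
  induction ys with
  | nil => intro s i; rfl
  | cons y ys ih =>
    intro s i
    simp only [pvLoopA, pvCheckFrom, beq_iff_eq]
    have hcast : ((i + 1 : Nat) : Int) = (i : Int) + 1 := by push_cast; ring
    by_cases h : y % 2 = (s + (i : Int)) % 2
    · have hne2 : ¬ ((s + (i : Int)) % 2 = (s + ((i + 1 : Nat) : Int)) % 2) := by
        rw [hcast]; omega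
      simp [h]
      intro hc
      exact absurd hc (by omega)
    · have heq : y % 2 = (s + ((i + 1 : Nat) : Int)) % 2 := by rw [hcast]; omega
      have hih := ih s (i + 1)
      rw [hcast] at hih heq
      have hne2 : ¬ ((s + ((i : Int) + 1)) % 2 = (s + (i : Int)) % 2) := by omega
      rw [heq, hih, if_neg hne2]
      simp

-- ===== VERDICT (by name: the statement is the Claim_ definition above) =====
theorem cl_09_is_alternating_parity_spec : Claim_equal_cl_09_is_alternating_parity := by
  intro nums _
  unfold Spec_cl_09_is_alternating_parity cl_09_is_alternating_parity cl_09_is_alternating_parity_alt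
  match nums with
  | [] => rfl
  | [x] => rfl
  | x :: y :: xs =>
    have hlen : ¬ ((x :: y :: xs).length ≤ 1) := by simp
    simp only [List.headI]
    rw [if_neg hlen, if_neg hlen]
    have hmain := pvLoop_check (y :: xs) (x % 2) 0
    have hp : (x % 2 + ((0 : Nat) : Int)) % 2 = x % 2 := by omega
    rw [hp] at hmain
    show pvLoopA (x % 2) (y :: xs) = pvCheckFrom (x % 2) 0 (x :: y :: xs)
    rw [hmain]
    simp only [pvCheckFrom]
    have hfirst : (x % 2 == (x % 2 + ((0 : Nat) : Int)) % 2) = true := by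
      rw [beq_iff_eq]; omega
    rw [hfirst, Bool.true_and]
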